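-- pv_equiv track=rewrite | github.com/Pradeep-Deep14/Sep-13_24 | 5.py | separate_unique_duplicate_elements
-- ===== SOURCE A (Python) =====
-- def separate_unique_duplicate_elements(L):
--     seen=set()
--     unique_elements=[]
--     duplicate_elements=[]
--     for i in L:
--         if i not in seen:
--             unique_elements.append(i)
--             seen.add(i)
--         else:
--             duplicate_elements.append(i)
--             seen.add(i)
--     return unique_elements,duplicate_elements
-- ===== SOURCE B (Python) =====
-- def separate_unique_duplicate_elements(L):
--     first_idx = {}
--     for idx, x in enumerate(L):
--         first_idx.setdefault(x, idx)
--     unique_elements = list(first_idx)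
--     duplicate_elements = [x for idx, x in enumerate(L) if first_idx[x] != idx]
--     return unique_elements, duplicate_elements
-- ===== Notes on version B (the rewrite author's own statement) =====
-- stated objective: alternative
-- what changed: Replaces the single set-tracking loop with two passes driven by a first-occurrence-index table: first_idx built with dict.setdefault, unique = list(first_idx), and duplicates as a comprehension keeping exactly the positions whose index differs from their value's first index.
import Mathlib
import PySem

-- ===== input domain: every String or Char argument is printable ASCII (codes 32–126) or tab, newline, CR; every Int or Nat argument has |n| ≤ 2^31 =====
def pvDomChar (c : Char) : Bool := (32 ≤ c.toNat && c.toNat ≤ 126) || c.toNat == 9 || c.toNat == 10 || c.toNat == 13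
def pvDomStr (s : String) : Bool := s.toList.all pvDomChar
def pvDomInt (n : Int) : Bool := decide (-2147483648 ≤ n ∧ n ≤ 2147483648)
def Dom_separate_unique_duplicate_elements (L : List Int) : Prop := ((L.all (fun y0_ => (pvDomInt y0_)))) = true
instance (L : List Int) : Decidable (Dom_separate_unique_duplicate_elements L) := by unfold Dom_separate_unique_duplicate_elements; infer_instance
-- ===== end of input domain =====

-- B replaces A's single set-tracking loop by two passes over a first-occurrence-index table
-- (dict.setdefault, keys, index-comparison comprehension); alternative structure, same cost.

-- ===== PORT A =====
def separate_unique_duplicate_elements (L : List Int) : List Int × List Int :=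
  let st := L.foldl
    (fun (st : PySem.Set Int × List Int × List Int) i =>
      if !(PySem.Set.contains st.1 i) then
        (PySem.Set.add st.1 i, st.2.1 ++ [i], st.2.2)
      else
        (PySem.Set.add st.1 i, st.2.1, st.2.2 ++ [i]))
    (PySem.Set.empty, [], [])
  (st.2.1, st.2.2)

-- ===== PORT B =====
def separate_unique_duplicate_elements_alt (L : List Int) : List Int × List Int :=
  let first_idx := (PySem.List.enumerate L).foldl
      (fun (d : PySem.Dict Int Int) p => PySem.Dict.setdefault d p.2 p.1) PySem.Dict.empty
  let unique_elements := PySem.Dict.keys first_idx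
  -- first_idx[x] in the comprehension: the key is always present (every x of L was setdefault'ed
  -- in the first pass), so Python's d[x] never raises; getD's default 0 is unreachable — exact here
  let duplicate_elements :=
    ((PySem.List.enumerate L).filter
      (fun p => decide (PySem.Dict.getD first_idx p.2 0 ≠ p.1))).map (·.2)
  (unique_elements, duplicate_elements)

-- ===== PRECONDITION & SPEC =====
def Spec_separate_unique_duplicate_elements (L : List Int) (out : List Int × List Int) : Prop := out = separate_unique_duplicate_elements_alt L
instance (L : List Int) (out : List Int × List Int) : Decidable (Spec_separate_unique_duplicate_elements L out) := by unfold Spec_separate_unique_duplicate_elements; infer_instance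

-- ===== CLAIM (what is proved, stated in full; the proofs are below) =====
def Claim_equal_separate_unique_duplicate_elements : Prop := ∀ (L : List Int), Dom_separate_unique_duplicate_elements L → Spec_separate_unique_duplicate_elements L (separate_unique_duplicate_elements L)

-- ===== LEMMAS AND PROOFS =====

-- proof-only helpers: the unique/duplicate parts produced by A's loop from a given seen set
def pvUniq (s : PySem.Set Int) : List Int → List Int
  | [] => []
  | x :: xs => if PySem.Set.contains s x then pvUniq (PySem.Set.add s x) xs
               else x :: pvUniq (PySem.Set.add s x) xs

def pvDup (s : PySem.Set Int) : List Int → List Int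
  | [] => []
  | x :: xs => if PySem.Set.contains s x then x :: pvDup (PySem.Set.add s x) xs
               else pvDup (PySem.Set.add s x) xs

theorem pvFoldA (xs : List Int) : ∀ (s : PySem.Set Int) (u d : List Int),
    xs.foldl
      (fun (st : PySem.Set Int × List Int × List Int) i =>
        if !(PySem.Set.contains st.1 i) then
          (PySem.Set.add st.1 i, st.2.1 ++ [i], st.2.2)
        else
          (PySem.Set.add st.1 i, st.2.1, st.2.2 ++ [i]))
      (s, u, d)
    = (PySem.Set.update s xs, u ++ pvUniq s xs, d ++ pvDup s xs) := by
  induction xs with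
  | nil => intro s u d; simp [pvUniq, pvDup, PySem.Set.update]
  | cons x xs ih =>
    intro s u d
    rw [List.foldl_cons]
    by_cases h : PySem.Set.contains s x = true
    · have hm : x ∈ s := (PySem.Set.contains_iff s x).mp h
      rw [if_neg (by rw [h]; simp)]
      rw [ih]
      simp [pvUniq, pvDup, hm, PySem.Set.update, List.append_assoc]
    · have hc : PySem.Set.contains s x = false := by simpa using h
      have hm : x ∉ s := fun m => h ((PySem.Set.contains_iff s x).mpr m)
      rw [if_pos (by rw [hc]; simp)]
      rw [ih]
      simp [pvUniq, pvDup, hm, PySem.Set.update, List.append_assoc]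

theorem pvUniq_eq (xs : List Int) : ∀ (s : PySem.Set Int),
    s ++ pvUniq s xs = PySem.Set.update s xs := by
  induction xs with
  | nil => intro s; simp [pvUniq, PySem.Set.update]
  | cons x xs ih =>
    intro s
    by_cases h : PySem.Set.contains s x = true
    · have hadd : PySem.Set.add s x = s := by
        simp only [PySem.Set.add, h, if_pos]
      calc s ++ pvUniq s (x :: xs)
          = s ++ pvUniq (PySem.Set.add s x) xs := by
            simp only [pvUniq, h, if_pos]
        _ = PySem.Set.update s xs := by rw [hadd]; exact ih s
        _ = PySem.Set.update s (x :: xs) := by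
            simp [PySem.Set.update, List.foldl_cons, hadd]
    · have hc : PySem.Set.contains s x = false := by simpa using h
      have hm : x ∉ s := fun m => h ((PySem.Set.contains_iff s x).mpr m)
      have hadd : PySem.Set.add s x = s ++ [x] := by
        simp [PySem.Set.add, hm]
      calc s ++ pvUniq s (x :: xs)
          = (s ++ [x]) ++ pvUniq (PySem.Set.add s x) xs := by
            simp [pvUniq, hm, List.append_assoc]
        _ = PySem.Set.update (PySem.Set.add s x) xs := by rw [← hadd]; exact ih _
        _ = PySem.Set.update s (x :: xs) := by simp [PySem.Set.update, List.foldl_cons]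

theorem pvIndex_first {r : List Int} {x : Int} : ∀ {P : List Int}, x ∉ P →
    PySem.List.index? (P ++ x :: r) x = some P.length := by
  intro P
  induction P with
  | nil =>
    intro _
    rw [List.nil_append, PySem.List.index?_cons_self]
    rfl
  | cons y P ih =>
    intro h
    have hy : y ≠ x := by intro e; exact h (e ▸ List.mem_cons_self)
    have hx : x ∉ P := fun m => h (List.mem_cons_of_mem _ m)
    rw [List.cons_append, PySem.List.index?_cons_of_ne _ hy, ih hx]
    rfl

theorem pvDup_eq (xs : List Int) : ∀ (P : List Int),
    ((PySem.List.enumerate xs (P.length : Int)).filter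
      (fun p => decide (((PySem.List.index? (P ++ xs) p.2).map (fun n => (n : Int))) ≠ some p.1))).map (·.2)
    = pvDup (PySem.Set.ofList P) xs := by
  induction xs with
  | nil => intro P; simp [pvDup, PySem.List.enumerate]
  | cons x xs ih =>
    intro P
    have hmem : x ∈ PySem.Set.ofList P ↔ x ∈ P := PySem.Set.mem_ofList P x
    have hset : PySem.Set.add (PySem.Set.ofList P) x = PySem.Set.ofList (P ++ [x]) := by
      simp [PySem.Set.ofList_eq_foldl]
    have hlen : ((P ++ [x]).length : Int) = (P.length : Int) + 1 := by
      simp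
    have hsplit : P ++ x :: xs = (P ++ [x]) ++ xs := by simp
    have htail :
        ((PySem.List.enumerate xs ((P.length : Int) + 1)).filter
          (fun p => decide (((PySem.List.index? (P ++ x :: xs) p.2).map (fun n => (n : Int))) ≠ some p.1))).map (·.2)
        = pvDup (PySem.Set.ofList (P ++ [x])) xs := by
      rw [hsplit]
      have := ih (P ++ [x])
      rw [hlen] at this
      exact this
    rw [PySem.List.enumerate_cons, List.filter_cons]
    by_cases h : x ∈ P
    · have hcont : PySem.Set.contains (PySem.Set.ofList P) x = true := by
        rw [PySem.Set.contains_iff]; exact hmem.mpr h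
      have hidx : PySem.List.index? (P ++ x :: xs) x = PySem.List.index? P x :=
        PySem.List.index?_append_of_mem _ h
      obtain ⟨k, hk⟩ := Option.isSome_iff_exists.mp ((PySem.List.index?_isSome_iff P x).mpr h)
      have hklt : k < P.length := (PySem.List.getElem_of_index?_eq_some hk).fst
      have hpred : (decide (((PySem.List.index? (P ++ x :: xs) x).map (fun n => (n : Int))) ≠ some ((P.length : Int)))) = true := by
        rw [hidx, hk]
        simp
        omega
      rw [hpred]
      simp only [if_pos, List.map_cons]
      rw [htail]
      simp only [pvDup, hcont, if_pos, hset]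
    · have hcont : PySem.Set.contains (PySem.Set.ofList P) x = false := by
        rw [Bool.eq_false_iff]
        intro hc
        exact h (hmem.mp ((PySem.Set.contains_iff _ _).mp hc))
      have hpred : (decide (((PySem.List.index? (P ++ x :: xs) x).map (fun n => (n : Int))) ≠ some ((P.length : Int)))) = false := by
        rw [pvIndex_first h]
        simp
      rw [hpred]
      simp only [Bool.false_eq_true, if_neg, not_false_iff]
      rw [htail]
      simp only [pvDup, hcont, Bool.false_eq_true, if_neg, hset, not_false_iff]

theorem pvSetdefault_eq (d : PySem.Dict Int Int) (k v : Int) :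
    PySem.Dict.setdefault d k v = if d.contains k = true then d else d.insert k v := by
  unfold PySem.Dict.setdefault
  split
  · rfl
  · rename_i h
    have hc : d.contains k = false := by simpa using h
    have hi := PySem.Dict.items_insert_of_not_contains (d := d) (k := k) (v := v) hc
    rw [← hi]

theorem pvKeysFold (xs : List Int) : ∀ (k : Int) (d : PySem.Dict Int Int),
    ((PySem.List.enumerate xs k).foldl (fun d p => PySem.Dict.setdefault d p.2 p.1) d).keys
    = PySem.Set.update d.keys xs := by
  induction xs with
  | nil => intro k d; simp [PySem.List.enumerate_nil, PySem.Set.update]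
  | cons y ys ih =>
    intro k d
    rw [PySem.List.enumerate_cons, List.foldl_cons]
    by_cases h : d.contains y = true
    · have hd : PySem.Dict.setdefault d y k = d := by rw [pvSetdefault_eq, if_pos h]
      have hmem : y ∈ d.keys := (PySem.Dict.contains_iff_mem_keys d y).mp h
      have hadd : PySem.Set.add d.keys y = d.keys := by simp [PySem.Set.add, hmem]
      rw [hd, ih]
      simp [PySem.Set.update, List.foldl_cons, hadd]
    · have hc : d.contains y = false := by simpa using h
      have hd : PySem.Dict.setdefault d y k = d.insert y k := by
        rw [pvSetdefault_eq, if_neg h]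
      have hmem : y ∉ d.keys := fun m => h ((PySem.Dict.contains_iff_mem_keys d y).mpr m)
      have hadd : PySem.Set.add d.keys y = d.keys ++ [y] := by simp [PySem.Set.add, hmem]
      rw [hd, ih, PySem.Dict.keys_insert_of_not_contains d k hc]
      rw [← hadd]
      simp [PySem.Set.update, List.foldl_cons]

theorem pvGetFold (xs : List Int) : ∀ (k : Int) (d : PySem.Dict Int Int) (x : Int),
    ((PySem.List.enumerate xs k).foldl (fun d p => PySem.Dict.setdefault d p.2 p.1) d).get? x
    = Option.or (d.get? x) ((PySem.List.index? xs x).map (fun (n : Nat) => k + (n : Int))) := by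
  induction xs with
  | nil =>
    intro k d x
    simp [PySem.List.enumerate_nil]
  | cons y ys ih =>
    intro k d x
    rw [PySem.List.enumerate_cons, List.foldl_cons, ih]
    by_cases hx : x = y
    · subst hx
      by_cases h : d.contains x = true
      · have hd : PySem.Dict.setdefault d x k = d := by rw [pvSetdefault_eq, if_pos h]
        have hs : (d.get? x).isSome = true := by
          rw [← PySem.Dict.contains_eq_isSome_get?]; exact h
        obtain ⟨v, hv⟩ := Option.isSome_iff_exists.mp hs
        rw [hd, PySem.List.index?_cons_self, hv]
        simp [Option.or]
      · have hd : PySem.Dict.setdefault d x k = d.insert x k := by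
          rw [pvSetdefault_eq, if_neg h]
        have hn : d.get? x = none := by
          cases hv : d.get? x with
          | none => rfl
          | some v =>
            exact absurd (by rw [PySem.Dict.contains_eq_isSome_get?, hv]; rfl) h
        rw [hd, PySem.Dict.get?_insert_self, hn, PySem.List.index?_cons_self]
        simp [Option.or]
    · have hne : y ≠ x := Ne.symm hx
      have hd : (PySem.Dict.setdefault d y k).get? x = d.get? x := by
        rw [pvSetdefault_eq]
        split
        · rfl
        · exact PySem.Dict.get?_insert_of_ne d k hx
      rw [hd, PySem.List.index?_cons_of_ne ys hne, Option.map_map]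
      congr 2
      funext n
      simp only [Function.comp]
      push_cast
      ring

-- ===== VERDICT (by name: the statement is the Claim_ definition above) =====
theorem separate_unique_duplicate_elements_spec : Claim_equal_separate_unique_duplicate_elements := by
  intro L _
  unfold Spec_separate_unique_duplicate_elements
  unfold separate_unique_duplicate_elements separate_unique_duplicate_elements_alt
  rw [pvFoldA]
  have huniq : pvUniq PySem.Set.empty L
      = ((PySem.List.enumerate L).foldl
          (fun (d : PySem.Dict Int Int) p => PySem.Dict.setdefault d p.2 p.1) PySem.Dict.empty).keys := by
    have h := pvUniq_eq L PySem.Set.empty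
    rw [show (PySem.Set.empty : PySem.Set Int) = [] from rfl] at h ⊢
    rw [List.nil_append] at h
    rw [h, pvKeysFold, PySem.Dict.keys_empty]
  have hconv : ∀ p ∈ PySem.List.enumerate L 0,
      (decide (PySem.Dict.getD ((PySem.List.enumerate L).foldl
          (fun (d : PySem.Dict Int Int) p => PySem.Dict.setdefault d p.2 p.1) PySem.Dict.empty) p.2 0 ≠ p.1))
      = (decide (((PySem.List.index? L p.2).map (fun n => (n : Int))) ≠ some p.1)) := by
    intro p hp
    obtain ⟨i, hi, hpe⟩ := (PySem.List.mem_enumerate_iff _ _ _).mp hp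
    have hmem : p.2 ∈ L := by rw [hpe]; exact List.getElem_mem hi
    obtain ⟨j, hj⟩ := Option.isSome_iff_exists.mp ((PySem.List.index?_isSome_iff L p.2).mpr hmem)
    have hget := pvGetFold L 0 PySem.Dict.empty p.2
    rw [PySem.Dict.get?_empty, hj] at hget
    rw [PySem.Dict.getD_eq_get?_getD, hget, hj]
    simp [Option.or]
  have hdup : pvDup PySem.Set.empty L
      = ((PySem.List.enumerate L).filter
          (fun p => decide (PySem.Dict.getD ((PySem.List.enumerate L).foldl
              (fun (d : PySem.Dict Int Int) p => PySem.Dict.setdefault d p.2 p.1) PySem.Dict.empty) p.2 0 ≠ p.1))).map (·.2) := by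
    have h := pvDup_eq L []
    rw [show (PySem.Set.empty : PySem.Set Int) = PySem.Set.ofList [] from rfl]
    rw [← h]
    rw [List.filter_congr hconv]
    norm_num
  rw [List.nil_append, List.nil_append, huniq, hdup]
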